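-- pv_equiv track=rewrite | github.com/fuongfotfet/document_extractor | enhanced_excel_extractor.py | _find_table_end
-- ===== SOURCE A (Python) =====
-- from typing import Dict, Any, List, Tuple
--
-- def _find_table_end(grid: List[List[str]], start_row: int) -> int:
--     """
--     Find where the table ends
--     """
--     table_end_row = start_row
--
--     for row_idx in range(start_row, len(grid)):
--         row = grid[row_idx]
--         non_empty_count = sum(1 for cell in row if cell and str(cell).strip() and str(cell).strip() != 'None')
--
--         if non_empty_count >= 3:  # Continue table
--             table_end_row = row_idx
--         elif non_empty_count == 0:
--             # Empty row might indicate end of table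
--             # Check next row to be sure
--             if row_idx + 1 < len(grid):
--                 next_row = grid[row_idx + 1]
--                 next_non_empty = sum(1 for cell in next_row if cell and str(cell).strip() and str(cell).strip() != 'None')
--                 if next_non_empty < 3:
--                     break  # End of table
--             else:
--                 break
--
--     return table_end_row
-- ===== SOURCE B (Python) =====
-- def _find_table_end(grid, start_row):
--     # Pass 1: per-row count of qualifying cells.
--     counts = [sum(1 for cell in row
--                   if cell and str(cell).strip() and str(cell).strip() != 'None')
--               for row in grid]
--     n = len(grid)
--     # Pass 2: find the first row at which the table ends (empty row whose
--     # successor is missing or not table-like); default: scan the whole grid.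
--     stop = n
--     for i in range(start_row, n):
--         if counts[i] == 0 and (i + 1 >= n or counts[i + 1] < 3):
--             stop = i
--             break
--     # Pass 3: the answer is the last table-like row before the stop point.
--     last = start_row
--     for j in range(start_row, stop):
--         if counts[j] >= 3:
--             last = j
--     return last
-- ===== Notes on version B (the rewrite author's own statement) =====
-- stated objective: simpler
-- what changed: Replaces A's single stateful loop (which re-counts the next row inline for the look-ahead and threads table_end_row through break logic) by three separate passes: a precomputed per-row count list, a search for the first stopping row, and a scan for the last table-like row before it.
import Mathlib
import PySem

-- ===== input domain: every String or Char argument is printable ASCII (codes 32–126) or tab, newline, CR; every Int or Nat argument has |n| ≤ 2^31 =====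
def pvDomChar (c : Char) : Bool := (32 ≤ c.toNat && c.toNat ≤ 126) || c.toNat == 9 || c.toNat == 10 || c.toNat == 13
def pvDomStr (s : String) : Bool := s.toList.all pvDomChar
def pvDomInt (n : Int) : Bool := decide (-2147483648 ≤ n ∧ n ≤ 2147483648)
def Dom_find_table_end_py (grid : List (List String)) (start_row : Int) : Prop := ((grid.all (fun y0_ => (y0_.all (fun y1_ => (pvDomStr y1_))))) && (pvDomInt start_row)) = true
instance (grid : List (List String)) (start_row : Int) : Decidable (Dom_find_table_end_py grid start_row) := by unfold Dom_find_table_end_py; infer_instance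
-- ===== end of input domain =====

-- B replaces A's single stateful loop (with an inline re-count of the next row) by three
-- separate passes: precomputed per-row counts, a search for the stop row, and a scan for the
-- last table-like row before it — objective: simpler decomposition (no speed claim).

-- ===== PORT A =====

-- the qualifying-cell count of one row: sum(1 for cell in row if cell and str(cell).strip() and str(cell).strip() != 'None')
def pvCountA (row : List String) : Int :=
  row.foldl (fun acc cell =>
    if cell ≠ "" ∧ PySem.Str.strip cell ≠ "" ∧ PySem.Str.strip cell ≠ "None"
    then acc + 1 else acc) 0

-- the for-loop with break; acc = table_end_row.  Out-of-range rows never occur inside Pre_.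
def pvALoop (grid : List (List String)) (n : Int) : List Int → Int → Int
  | [], acc => acc
  | i :: rest, acc =>
    let row := (PySem.List.pyGet? grid i).getD []
    let c := pvCountA row
    if c ≥ 3 then pvALoop grid n rest i
    else if c = 0 then
      if i + 1 < n then
        let next_row := (PySem.List.pyGet? grid (i + 1)).getD []
        if pvCountA next_row < 3 then acc else pvALoop grid n rest acc
      else acc
    else pvALoop grid n rest acc

def find_table_end_py (grid : List (List String)) (start_row : Int) : Int :=
  pvALoop grid grid.length (PySem.List.pyRange start_row grid.length 1) start_row

-- ===== PORT B =====

-- counts[i] for one row (B's comprehension uses the same predicate)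
def pvCountB (row : List String) : Int :=
  row.foldl (fun acc cell =>
    if cell ≠ "" ∧ PySem.Str.strip cell ≠ "" ∧ PySem.Str.strip cell ≠ "None"
    then acc + 1 else acc) 0

-- pass 2: first i in range(start_row, n) with counts[i] == 0 and (i+1 >= n or counts[i+1] < 3); default n
def pvBStop (counts : List Int) (n : Int) : List Int → Int
  | [] => n
  | i :: rest =>
    if (PySem.List.pyGet? counts i).getD 0 = 0 ∧
       (i + 1 ≥ n ∨ (PySem.List.pyGet? counts (i + 1)).getD 0 < 3)
    then i else pvBStop counts n rest

def find_table_end_py_alt (grid : List (List String)) (start_row : Int) : Int :=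
  let counts := grid.map pvCountB
  let n : Int := grid.length
  let stop := pvBStop counts n (PySem.List.pyRange start_row n 1)
  -- pass 3: last j in range(start_row, stop) with counts[j] >= 3, default start_row
  (PySem.List.pyRange start_row stop 1).foldl
    (fun last j => if (PySem.List.pyGet? counts j).getD 0 ≥ 3 then j else last) start_row

-- ===== PRECONDITION & SPEC =====
-- Pre_ excludes exactly the inputs where A raises IndexError (grid[start_row] with
-- start_row < -len(grid)); B raises there too.
def Pre_find_table_end_py (grid : List (List String)) (start_row : Int) : Prop :=
  -(grid.length : Int) ≤ start_row
instance (grid : List (List String)) (start_row : Int) : Decidable (Pre_find_table_end_py grid start_row) := by unfold Pre_find_table_end_py; infer_instance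
def pvWitness_find_table_end_py : List (List String) × Int := ([["a", "b", "c"], [""]], 0)

def Spec_find_table_end_py (grid : List (List String)) (start_row : Int) (out : Int) : Prop := out = find_table_end_py_alt grid start_row
instance (grid : List (List String)) (start_row : Int) (out : Int) : Decidable (Spec_find_table_end_py grid start_row out) := by unfold Spec_find_table_end_py; infer_instance

-- ===== CLAIM (what is proved, stated in full; the proofs are below) =====
def Claim_equal_find_table_end_py : Prop := ∀ (grid : List (List String)) (start_row : Int), Dom_find_table_end_py grid start_row → Pre_find_table_end_py grid start_row → Spec_find_table_end_py grid start_row (find_table_end_py grid start_row)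

-- ===== LEMMAS AND PROOFS =====

-- B's counts lookup agrees with A's recount of the fetched row (both give 0 out of range).
theorem pv_counts_get (grid : List (List String)) (i : Int) :
    (PySem.List.pyGet? (grid.map pvCountB) i).getD 0
      = pvCountA ((PySem.List.pyGet? grid i).getD []) := by
  have h : PySem.List.pyGet? (grid.map pvCountB) i = (PySem.List.pyGet? grid i).map pvCountB := by
    simp [PySem.List.pyGet?, PySem.List.pyIdx?]
  rw [h]
  cases PySem.List.pyGet? grid i <;> simp [pvCountA, pvCountB]

theorem pv_bstop_ge (counts : List Int) (n s : Int) (hs : s ≤ n) :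
    s ≤ pvBStop counts n (PySem.List.pyRange s n 1) := by
  by_cases h : s < n
  · rw [PySem.List.pyRange_one_cons h]
    unfold pvBStop
    split
    · exact le_refl s
    · have := pv_bstop_ge counts n (s + 1) (by omega)
      omega
  · rw [PySem.List.pyRange_one_eq_nil (by omega)]
    simpa [pvBStop] using hs
termination_by (n - s).toNat
decreasing_by omega

-- main induction: A's loop from s with accumulator acc = B's phases from s with seed acc
theorem pv_main (grid : List (List String)) (s acc : Int) :
    pvALoop grid grid.length (PySem.List.pyRange s grid.length 1) acc
      = (PySem.List.pyRange s
            (pvBStop (grid.map pvCountB) grid.length (PySem.List.pyRange s grid.length 1)) 1).foldl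
          (fun last j => if (PySem.List.pyGet? (grid.map pvCountB) j).getD 0 ≥ 3 then j else last)
          acc := by
  set counts := grid.map pvCountB with hc
  set n : Int := (grid.length : Int) with hn
  by_cases h : s < n
  · rw [PySem.List.pyRange_one_cons h]
    have hcget : (PySem.List.pyGet? counts s).getD 0
        = pvCountA ((PySem.List.pyGet? grid s).getD []) := pv_counts_get grid s
    have hcget' : (PySem.List.pyGet? counts (s + 1)).getD 0
        = pvCountA ((PySem.List.pyGet? grid (s + 1)).getD []) := pv_counts_get grid (s + 1)
    have hstop1 := pv_bstop_ge counts n (s + 1) (by omega)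
    unfold pvALoop pvBStop
    by_cases h3 : pvCountA ((PySem.List.pyGet? grid s).getD []) ≥ 3
    · -- count ≥ 3: A sets acc := s; B: no stop here, s survives pass 3
      rw [if_pos h3]
      rw [if_neg (by rw [hcget]; omega)]
      rw [PySem.List.pyRange_one_cons (by omega : s < pvBStop counts n (PySem.List.pyRange (s+1) n 1))]
      simp only [List.foldl_cons]
      rw [if_pos (by rw [hcget]; omega)]
      exact pv_main grid (s + 1) s
    · rw [if_neg h3]
      by_cases h0 : pvCountA ((PySem.List.pyGet? grid s).getD []) = 0
      · rw [if_pos h0]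
        by_cases hnx : s + 1 < n
        · rw [if_pos hnx]
          by_cases hlt : pvCountA ((PySem.List.pyGet? grid (s + 1)).getD []) < 3
          · -- break: B stops at s, pass-3 range empty
            rw [if_pos hlt, if_pos (by rw [hcget, hcget']; omega)]
            rw [PySem.List.pyRange_one_eq_nil (le_refl s)]
            rfl
          · rw [if_neg hlt, if_neg (by rw [hcget, hcget']; omega)]
            rw [PySem.List.pyRange_one_cons (by omega : s < pvBStop counts n (PySem.List.pyRange (s+1) n 1))]
            simp only [List.foldl_cons]
            rw [if_neg (by rw [hcget]; omega)]
            exact pv_main grid (s + 1) acc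
        · -- s is the last row and empty: break; B stops at s
          rw [if_neg hnx, if_pos (by rw [hcget]; omega)]
          rw [PySem.List.pyRange_one_eq_nil (le_refl s)]
          rfl
      · -- 1 ≤ count ≤ 2: both just continue
        rw [if_neg h0, if_neg (by rw [hcget]; omega)]
        rw [PySem.List.pyRange_one_cons (by omega : s < pvBStop counts n (PySem.List.pyRange (s+1) n 1))]
        simp only [List.foldl_cons]
        rw [if_neg (by rw [hcget]; omega)]
        exact pv_main grid (s + 1) acc
  · -- s ≥ n: A returns acc; B: stop = n ≤ s, empty pass-3 range
    rw [PySem.List.pyRange_one_eq_nil (by omega)]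
    unfold pvALoop pvBStop
    rw [PySem.List.pyRange_one_eq_nil (by omega)]
    rfl
termination_by ((grid.length : Int) - s).toNat
decreasing_by all_goals omega

-- ===== VERDICT (by name: the statement is the Claim_ definition above) =====
theorem find_table_end_py_spec : Claim_equal_find_table_end_py := by
  intro grid start_row _ _
  unfold Spec_find_table_end_py find_table_end_py find_table_end_py_alt
  exact pv_main grid start_row start_row
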